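-- pv_equiv track=rewrite | github.com/stefanwebb/coding-challenge-preparation | coderbyte/easy/food-distribution.py | FoodDistribution
-- ===== SOURCE A (Python) =====
-- def FoodDistribution(arr):
--     sandwiches = arr[0]
--     hungers = arr[1:]
--     countPeople = len(hungers)
--
--     for jdx in range(sandwiches):
--         maxDiff = -2
--         maxIdx = -1
--
--         for idx in range(countPeople):
--             # Work out the change of giving a sandwich to each person
--             diff = 0
--             if idx < countPeople-1:
--                 diff += 1 if hungers[idx] > hungers[idx+1] else -1
--             if idx > 0:
--                 diff += 1 if hungers[idx] > hungers[idx-1] else -1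
--             if diff > maxDiff:
--                 maxDiff = diff
--                 maxIdx = idx
--
--         if maxDiff >= 0:
--             hungers[maxIdx] -= 1
--         else:
--             break
--
--     # Calculate result
--     diffs = []
--     for jdx in range(len(hungers)-1):
--         diffs.append(abs(hungers[jdx] - hungers[jdx+1]))
--
--     # code goes here
--     return sum(diffs)
-- ===== SOURCE B (Python) =====
-- def FoodDistribution(arr):
--     sandwiches = arr[0]
--     h = arr[1:]
--     n = len(h)
--
--     def diff(i):
--         t = 0
--         if i < n - 1:
--             t += 1 if h[i] > h[i + 1] else -1
--         if i > 0:
--             t += 1 if h[i] > h[i - 1] else -1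
--         return t
--
--     # tournament (segment) tree over indices [0, n): each node stores the best
--     # (diff, index) of its range, ties going to the smaller index; one give-away
--     # touches only 3 leaves, so each round is O(log n) after an O(n) read of the root.
--     def better(a, b):
--         return b if b[0] > a[0] else a
--
--     def best(t):
--         return (t[2], t[1]) if t[0] == 'L' else t[1]
--
--     def build(lo, hi):
--         if hi - lo == 1:
--             return ['L', lo, diff(lo)]
--         mid = (lo + hi) // 2
--         l = build(lo, mid)
--         r = build(mid, hi)
--         return ['N', better(best(l), best(r)), mid, l, r]
--
--     def update(t, j):
--         if t[0] == 'L':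
--             t[2] = diff(j)
--         else:
--             if j < t[2]:
--                 update(t[3], j)
--             else:
--                 update(t[4], j)
--             t[1] = better(best(t[3]), best(t[4]))
--
--     if n > 0:
--         tree = build(0, n)
--         for _ in range(sandwiches):
--             d, i = best(tree)
--             if d < 0:
--                 break
--             h[i] -= 1
--             for j in (i - 1, i, i + 1):
--                 if 0 <= j < n:
--                     update(tree, j)
--
--     return sum(abs(a - b) for a, b in zip(h, h[1:]))
-- ===== Notes on version B (the rewrite author's own statement) =====
-- stated objective: faster
-- what changed: B replaces A's full O(n) rescan of every person's improvement for each sandwich by a tournament (segment) tree that stores the best (improvement, index) of each index range: the recipient is read off the root in O(1) and only the <=3 leaves a give-away can affect are updated along O(log n) paths.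
import Mathlib
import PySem

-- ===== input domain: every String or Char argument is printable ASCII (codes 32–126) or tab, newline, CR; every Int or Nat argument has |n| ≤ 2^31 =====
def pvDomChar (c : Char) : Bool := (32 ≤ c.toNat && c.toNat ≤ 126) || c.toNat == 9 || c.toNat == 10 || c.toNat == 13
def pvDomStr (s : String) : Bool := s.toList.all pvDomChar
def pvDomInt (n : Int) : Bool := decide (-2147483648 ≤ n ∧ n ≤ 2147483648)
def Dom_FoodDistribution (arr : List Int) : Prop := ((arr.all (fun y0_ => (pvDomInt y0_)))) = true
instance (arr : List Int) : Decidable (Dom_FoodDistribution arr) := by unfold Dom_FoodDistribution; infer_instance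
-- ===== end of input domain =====

-- B replaces A's per-sandwich O(n) rescan by a tournament (segment) tree over the people,
-- reading the recipient off the root and updating only the ≤3 affected leaves per give-away
-- (objective: faster, O(n + S log n) vs O(S·n)). Return-value equivalence only: the Python A
-- mutates no caller-visible state (it rebinds arr[1:]).

-- ===== PORT A =====
-- change of total adjacent difference from giving person idx a sandwich (A's inner diff)
def pvDiffA (h : List Int) (n idx : Int) : Int :=
  0 + (if idx < n - 1 then (if PySem.List.pyGetD h idx 0 > PySem.List.pyGetD h (idx+1) 0 then (1:Int) else -1) else 0)
    + (if idx > 0 then (if PySem.List.pyGetD h idx 0 > PySem.List.pyGetD h (idx-1) 0 then (1:Int) else -1) else 0)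

-- A's inner scan: for idx in range(countPeople), keeping (maxDiff, maxIdx)
def pvScanA (h : List Int) (n : Int) : Int × Int :=
  (PySem.List.pyRange 0 n 1).foldl
    (fun st idx => if pvDiffA h n idx > st.1 then (pvDiffA h n idx, idx) else st)
    (-2, -1)

-- A's outer loop: one fuel unit per sandwich, early break when maxDiff < 0
def pvLoopA (n : Int) (h : List Int) : Nat → List Int
  | 0 => h
  | k+1 =>
    let st := pvScanA h n
    if st.1 ≥ 0 then
      pvLoopA n (PySem.List.pySetD h st.2 (PySem.List.pyGetD h st.2 0 - 1)) k
    else h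

def FoodDistribution (arr : List Int) : Int :=
  match PySem.List.pyGet? arr 0 with
  | none => 0  -- IndexError in Python on empty arr; excluded by Pre_
  | some s =>
    let h := PySem.List.slice arr (some 1) none
    let n : Int := h.length
    let h2 := pvLoopA n h s.toNat
    ((PySem.List.pyRange 0 ((h2.length : Int) - 1) 1).map
       (fun j => |PySem.List.pyGetD h2 j 0 - PySem.List.pyGetD h2 (j+1) 0|)).sum

-- ===== PORT B =====
-- B's local diff helper (closure over the current hungers h and n)
def pvDiffB (h : List Int) (n i : Int) : Int :=
  0 + (if i < n - 1 then (if PySem.List.pyGetD h i 0 > PySem.List.pyGetD h (i+1) 0 then (1:Int) else -1) else 0)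
    + (if i > 0 then (if PySem.List.pyGetD h i 0 > PySem.List.pyGetD h (i-1) 0 then (1:Int) else -1) else 0)

-- tournament-tree node: a leaf per person, inner nodes store the best (diff, index) of
-- their range (ties to the smaller index) and the split point mid
inductive PvTree where
  | leaf (idx val : Int)
  | node (best : Int × Int) (mid : Int) (l r : PvTree)
deriving Repr

-- better(a, b) = b if b[0] > a[0] else a
def pvBetter (a b : Int × Int) : Int × Int := if b.1 > a.1 then b else a

-- best(t)
def pvBest : PvTree → Int × Int
  | .leaf i v => (v, i)
  | .node b _ _ _ => b

-- midpoint bounds, needed for build's termination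
theorem pv_mid_bounds (lo hi : Int) (h : 2 ≤ hi - lo) :
    lo < PySem.Int.floordiv (lo + hi) 2 ∧ PySem.Int.floordiv (lo + hi) 2 < hi := by
  constructor
  · have := (PySem.Int.le_floordiv_iff_mul_le (a := lo + hi) (b := 2) (q := lo + 1) (by omega)).mpr (by omega)
    omega
  · have := (PySem.Int.floordiv_lt_iff_lt_mul (a := lo + hi) (b := 2) (q := hi) (by omega)).mpr (by omega)
    omega

-- build(lo, hi); the 'hi - lo ≤ 1' guard (Python: hi - lo == 1, only ever called with lo < hi)
-- is a totality guard for the same computation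
def pvBuild (g : Int → Int) (lo hi : Int) : PvTree :=
  if _h : hi - lo ≤ 1 then .leaf lo (g lo)
  else
    let mid := PySem.Int.floordiv (lo + hi) 2
    let l := pvBuild g lo mid
    let r := pvBuild g mid hi
    .node (pvBetter (pvBest l) (pvBest r)) mid l r
termination_by (hi - lo).toNat
decreasing_by
  · have := pv_mid_bounds lo hi (by omega); omega
  · have := pv_mid_bounds lo hi (by omega); omega

-- update(t, j): rewrite the leaf reached by descending on mid, recompute best on the way up
def pvUpdate (g : Int → Int) (j : Int) : PvTree → PvTree
  | .leaf i _ => .leaf i (g j)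
  | .node _ m l r =>
    if j < m then
      let l' := pvUpdate g j l
      .node (pvBetter (pvBest l') (pvBest r)) m l' r
    else
      let r' := pvUpdate g j r
      .node (pvBetter (pvBest l) (pvBest r')) m l r'

-- B's outer loop: read the root, decrement, refresh the ≤3 affected leaves
def pvLoopB (n : Int) (h : List Int) (t : PvTree) : Nat → List Int
  | 0 => h
  | k+1 =>
    let bi := pvBest t
    if bi.1 < 0 then h
    else
      let h' := PySem.List.pySetD h bi.2 (PySem.List.pyGetD h bi.2 0 - 1)
      let t' := [bi.2 - 1, bi.2, bi.2 + 1].foldl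
        (fun tt j => if 0 ≤ j ∧ j < n then pvUpdate (pvDiffB h' n) j tt else tt) t
      pvLoopB n h' t' k

def FoodDistribution_alt (arr : List Int) : Int :=
  match PySem.List.pyGet? arr 0 with
  | none => 0  -- IndexError in Python on empty arr; excluded by Pre_
  | some s =>
    let h := PySem.List.slice arr (some 1) none
    let n : Int := h.length
    let h2 := if 0 < n then pvLoopB n h (pvBuild (pvDiffB h n) 0 n) s.toNat else h
    ((h2.zip (h2.drop 1)).map (fun p => |p.1 - p.2|)).sum

-- ===== PRECONDITION & SPEC =====
-- Python A raises IndexError on an empty input list (its first indexing); that is the only input excluded.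
def Pre_FoodDistribution (arr : List Int) : Prop := arr ≠ []
instance (arr : List Int) : Decidable (Pre_FoodDistribution arr) := by unfold Pre_FoodDistribution; infer_instance
def pvWitness_FoodDistribution : List Int := ([5, 3, 1, 2, 1] : List Int)

def Spec_FoodDistribution (arr : List Int) (out : Int) : Prop := out = FoodDistribution_alt arr
instance (arr : List Int) (out : Int) : Decidable (Spec_FoodDistribution arr out) := by unfold Spec_FoodDistribution; infer_instance

-- ===== CLAIM (what is proved, stated in full; the proofs are below) =====
def Claim_equal_FoodDistribution : Prop := ∀ (arr : List Int), Dom_FoodDistribution arr → Pre_FoodDistribution arr → Spec_FoodDistribution arr (FoodDistribution arr)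

-- ===== LEMMAS AND PROOFS =====

-- t represents the index range [lo, hi) with leaf values given by g
def pvRepr (g : Int → Int) : Int → Int → PvTree → Prop
  | lo, hi, .leaf i v => i = lo ∧ hi = lo + 1 ∧ v = g lo
  | lo, hi, .node b m l r =>
      lo < m ∧ m < hi ∧ pvRepr g lo m l ∧ pvRepr g m hi r ∧ b = pvBetter (pvBest l) (pvBest r)

-- the left-biased running best of (g j, j) over [lo, hi), from a neutral start
def pvSegFold (g : Int → Int) (lo hi : Int) : Int × Int :=
  (PySem.List.pyRange lo hi 1).foldl (fun s j => pvBetter s (g j, j)) (-3, -1)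

theorem pvBetter_assoc (a b c : Int × Int) :
    pvBetter (pvBetter a b) c = pvBetter a (pvBetter b c) := by
  unfold pvBetter; split_ifs <;> first | rfl | (exfalso; omega)

theorem pvBetter_fst_ge_left (a b : Int × Int) : a.1 ≤ (pvBetter a b).1 := by
  unfold pvBetter; split_ifs <;> omega

theorem pv_fold_fst_mono (g : Int → Int) (l : List Int) :
    ∀ s : Int × Int, s.1 ≤ (l.foldl (fun s j => pvBetter s (g j, j)) s).1 := by
  induction l with
  | nil => intro s; exact le_refl _
  | cons x t ih =>
    intro s
    calc s.1 ≤ (pvBetter s (g x, x)).1 := pvBetter_fst_ge_left _ _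
    _ ≤ _ := ih _

theorem pv_fold_shift (g : Int → Int) (l : List Int) :
    ∀ s : Int × Int, -3 ≤ s.1 → (∀ x ∈ l, -3 < g x) →
      l.foldl (fun s j => pvBetter s (g j, j)) s
        = pvBetter s (l.foldl (fun s j => pvBetter s (g j, j)) (-3, -1)) := by
  induction l with
  | nil =>
    intro s hs _
    simp only [List.foldl_nil]
    unfold pvBetter
    rw [if_neg (by omega)]
  | cons x t ih =>
    intro s hs hl
    have hx : -3 < g x := hl x (by simp)
    have hnx : pvBetter (-3, -1) (g x, x) = (g x, x) := by
      unfold pvBetter; rw [if_pos (by simpa using hx)]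
    simp only [List.foldl_cons]
    rw [ih (pvBetter s (g x, x)) (le_trans hs (pvBetter_fst_ge_left _ _)) (fun y hy => hl y (by simp [hy])),
        ih (pvBetter (-3, -1) (g x, x)) (by rw [hnx]; simpa using le_of_lt hx) (fun y hy => hl y (by simp [hy])),
        hnx, ← pvBetter_assoc]

theorem pv_segFold_fst_ge (g : Int → Int) (lo hi : Int) : -3 ≤ (pvSegFold g lo hi).1 := by
  unfold pvSegFold
  have := pv_fold_fst_mono g (PySem.List.pyRange lo hi 1) (-3, -1)
  simpa using this

theorem pv_repr_best (g : Int → Int) (hg : ∀ x, -3 < g x) :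
    ∀ (t : PvTree) (lo hi : Int), pvRepr g lo hi t → pvBest t = pvSegFold g lo hi := by
  intro t
  induction t with
  | leaf i v =>
    intro lo hi hr
    obtain ⟨h1, h2, h3⟩ := hr
    subst h1 h2 h3
    unfold pvSegFold
    rw [PySem.List.pyRange_one_cons (by omega), PySem.List.pyRange_one_eq_nil (by omega)]
    simp only [List.foldl_cons, List.foldl_nil, pvBest]
    unfold pvBetter
    rw [if_pos (by simpa using hg i)]
  | node b m l r ihl ihr =>
    intro lo hi hr
    obtain ⟨h1, h2, hl, hr', hb⟩ := hr
    have e1 : pvSegFold g lo hi = pvBetter (pvSegFold g lo m) (pvSegFold g m hi) := by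
      unfold pvSegFold
      rw [PySem.List.pyRange_one_append lo m hi (by omega) (by omega), List.foldl_append]
      exact pv_fold_shift g _ _ (pv_segFold_fst_ge g lo m) (fun x _ => hg x)
    rw [e1]
    have hn : pvBest (PvTree.node b m l r) = b := rfl
    rw [hn, hb, ihl lo m hl, ihr m hi hr']

theorem pv_repr_congr (g g' : Int → Int) :
    ∀ (t : PvTree) (lo hi : Int), pvRepr g lo hi t →
      (∀ x, lo ≤ x → x < hi → g x = g' x) → pvRepr g' lo hi t := by
  intro t
  induction t with
  | leaf i v =>
    intro lo hi hr he
    obtain ⟨h1, h2, h3⟩ := hr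
    exact ⟨h1, h2, by rw [h3, he lo (by omega) (by omega)]⟩
  | node b m l r ihl ihr =>
    intro lo hi hr he
    obtain ⟨h1, h2, hl, hr', hb⟩ := hr
    exact ⟨h1, h2, ihl lo m hl (fun x hx1 hx2 => he x hx1 (by omega)),
           ihr m hi hr' (fun x hx1 hx2 => he x (by omega) hx2), hb⟩

theorem pv_repr_build (g : Int → Int) :
    ∀ (k : Nat) (lo hi : Int), (hi - lo).toNat ≤ k → lo < hi →
      pvRepr g lo hi (pvBuild g lo hi) := by
  intro k
  induction k with
  | zero => intro lo hi hk hlh; omega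
  | succ k ih =>
    intro lo hi hk hlh
    rw [pvBuild]
    by_cases h1 : hi - lo ≤ 1
    · rw [dif_pos h1]
      exact ⟨rfl, by omega, rfl⟩
    · rw [dif_neg h1]
      have hm := pv_mid_bounds lo hi (by omega)
      exact ⟨hm.1, hm.2,
        ih lo _ (by omega) hm.1,
        ih _ hi (by omega) hm.2, rfl⟩

theorem pv_repr_update (g gn : Int → Int) :
    ∀ (t : PvTree) (lo hi j : Int), pvRepr g lo hi t → lo ≤ j → j < hi →
      pvRepr (fun x => if x = j then gn j else g x) lo hi (pvUpdate gn j t) := by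
  intro t
  induction t with
  | leaf i v =>
    intro lo hi j hr hj1 hj2
    obtain ⟨h1, h2, _⟩ := hr
    have hji : j = lo := by omega
    exact ⟨h1, h2, by show gn j = if lo = j then gn j else g lo; rw [if_pos (by omega)]⟩
  | node b m l r ihl ihr =>
    intro lo hi j hr hj1 hj2
    obtain ⟨h1, h2, hl, hr', hb⟩ := hr
    unfold pvUpdate
    by_cases hjm : j < m
    · rw [if_pos hjm]
      exact ⟨h1, h2, ihl lo m j hl hj1 hjm,
        pv_repr_congr g _ r m hi hr' (fun x hx1 _ => by rw [if_neg (by omega)]), rfl⟩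
    · rw [if_neg hjm]
      exact ⟨h1, h2,
        pv_repr_congr g _ l lo m hl (fun x _ hx2 => by rw [if_neg (by omega)]),
        ihr m hi j hr' (by omega) hj2, rfl⟩

theorem pv_diff0_gt (h : List Int) (n : Int) : pvDiffA h n 0 > -2 := by
  unfold pvDiffA
  split_ifs <;> omega

theorem pv_diffA_gt (h : List Int) (n x : Int) : -3 < pvDiffA h n x := by
  unfold pvDiffA
  split_ifs <;> omega

theorem pv_getD_set (l : List Int) (i x v : Int) (hi0 : 0 ≤ i) (_hin : i < (l.length:Int))
    (hx0 : 0 ≤ x) (hxn : x < (l.length:Int)) :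
    PySem.List.pyGetD (PySem.List.pySetD l i v) x 0 = if x = i then v else PySem.List.pyGetD l x 0 := by
  rw [PySem.List.pySetD_of_nonneg _ _ hi0,
      PySem.List.pyGetD_eq_getElem _ _ hx0 (by simpa using hxn),
      List.getElem_set]
  by_cases he : x = i
  · rw [if_pos (by omega), if_pos he]
  · rw [if_neg (by omega), if_neg he, PySem.List.pyGetD_eq_getElem _ _ hx0 hxn]

-- decrementing index i leaves the diff unchanged away from i-1, i, i+1
theorem pv_diff_local (h : List Int) (i j v : Int) (hi0 : 0 ≤ i) (hin : i < (h.length:Int))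
    (hj0 : 0 ≤ j) (hjn : j < (h.length:Int))
    (hj : j ≠ i - 1 ∧ j ≠ i ∧ j ≠ i + 1) :
    pvDiffA (PySem.List.pySetD h i v) (h.length) j = pvDiffA h (h.length) j := by
  unfold pvDiffA
  congr 1
  · congr 1
    by_cases h1 : j < (h.length : Int) - 1
    · rw [if_pos h1, if_pos h1,
          pv_getD_set h i j v hi0 hin hj0 hjn, if_neg hj.2.1,
          pv_getD_set h i (j+1) v hi0 hin (by omega) (by omega), if_neg (show ¬(j+1 = i) by omega)]
    · rw [if_neg h1, if_neg h1]
  · by_cases h2 : j > 0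
    · rw [if_pos h2, if_pos h2,
          pv_getD_set h i j v hi0 hin hj0 hjn, if_neg hj.2.1,
          pv_getD_set h i (j-1) v hi0 hin (by omega) (by omega), if_neg (show ¬(j-1 = i) by omega)]
    · rw [if_neg h2, if_neg h2]

-- the running best is the neutral start or some visited (g j, j)
theorem pv_fold_result (g : Int → Int) (l : List Int) :
    ∀ s : Int × Int, l.foldl (fun s j => pvBetter s (g j, j)) s = s ∨
      ∃ j ∈ l, l.foldl (fun s j => pvBetter s (g j, j)) s = (g j, j) := by
  induction l with
  | nil => intro s; exact Or.inl rfl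
  | cons x t ih =>
    intro s
    simp only [List.foldl_cons]
    rcases ih (pvBetter s (g x, x)) with hc | ⟨j, hj1, hj2⟩
    · rw [hc]
      unfold pvBetter
      split_ifs
      · exact Or.inr ⟨x, by simp, rfl⟩
      · exact Or.inl rfl
    · exact Or.inr ⟨j, by simp [hj1], hj2⟩

-- A's scan equals the neutral-start segment fold (n > 0)
theorem pv_scan_eq_segFold (h : List Int) (n : Int) (hn : 0 < n) :
    pvScanA h n = pvSegFold (pvDiffA h n) 0 n := by
  have hstep : (fun (st : Int × Int) idx => if pvDiffA h n idx > st.1 then (pvDiffA h n idx, idx) else st)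
      = (fun (st : Int × Int) j => pvBetter st (pvDiffA h n j, j)) := by
    funext st j
    unfold pvBetter
    rfl
  unfold pvScanA
  rw [hstep, pv_fold_shift (pvDiffA h n) _ (-2, -1) (by norm_num) (fun x _ => pv_diffA_gt h n x)]
  have hfst : -2 < (pvSegFold (pvDiffA h n) 0 n).1 := by
    unfold pvSegFold
    rw [PySem.List.pyRange_one_cons (by omega)]
    simp only [List.foldl_cons]
    have he : pvBetter (-3, -1) (pvDiffA h n 0, 0) = (pvDiffA h n 0, 0) := by
      unfold pvBetter
      rw [if_pos (by simpa using pv_diffA_gt h n 0)]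
    rw [he]
    have := pv_fold_fst_mono (pvDiffA h n) (PySem.List.pyRange (0+1) n 1) (pvDiffA h n 0, 0)
    have h0 := pv_diff0_gt h n
    simp only at this
    omega
  unfold pvSegFold at hfst ⊢
  unfold pvBetter
  rw [if_pos (by simpa using hfst)]

-- the chosen index is in range (n > 0)
theorem pv_segFold_idx (h : List Int) (n : Int) (hn : 0 < n) :
    0 ≤ (pvSegFold (pvDiffA h n) 0 n).2 ∧ (pvSegFold (pvDiffA h n) 0 n).2 < n := by
  unfold pvSegFold
  rcases pv_fold_result (pvDiffA h n) (PySem.List.pyRange 0 n 1) (-3, -1) with hc | ⟨j, hj1, hj2⟩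
  · exfalso
    have := pv_scan_eq_segFold h n hn
    unfold pvSegFold at this
    rw [hc] at this
    have h0 := pv_diff0_gt h n
    -- A's scan has fst > -2 ≥ fst of (-3,-1): contradiction
    have : pvScanA h n = ((-3 : Int), (-1 : Int)) := this
    have hfst : (pvScanA h n).1 = -3 := by rw [this]
    unfold pvScanA at hfst
    have hm := pv_fold_fst_mono (pvDiffA h n) (PySem.List.pyRange 0 n 1) (-2, -1)
    have hstep : (fun (st : Int × Int) idx => if pvDiffA h n idx > st.1 then (pvDiffA h n idx, idx) else st)
        = (fun (st : Int × Int) j => pvBetter st (pvDiffA h n j, j)) := by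
      funext st j; unfold pvBetter; rfl
    rw [hstep] at hfst
    simp only at hm
    omega
  · rw [hj2]
    have := PySem.List.mem_pyRange_one.mp hj1
    simpa using this

-- after decrementing i and refreshing the ≤3 affected leaves, the tree represents the new diffs
theorem pv_tree_step (h : List Int) (t : PvTree) (i : Int)
    (hi0 : 0 ≤ i) (hin : i < (h.length : Int))
    (hr : pvRepr (pvDiffA h (h.length)) 0 (h.length) t) :
    pvRepr (pvDiffA (PySem.List.pySetD h i (PySem.List.pyGetD h i 0 - 1)) (h.length)) 0 (h.length)
      ([i - 1, i, i + 1].foldl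
        (fun tt j => if 0 ≤ j ∧ j < (h.length : Int) then
          pvUpdate (pvDiffB (PySem.List.pySetD h i (PySem.List.pyGetD h i 0 - 1)) (h.length)) j tt else tt) t) := by
  set n : Int := (h.length : Int) with hn
  set h' := PySem.List.pySetD h i (PySem.List.pyGetD h i 0 - 1) with hh'
  have hBA : pvDiffB h' n = pvDiffA h' n := rfl
  simp only [List.foldl_cons, List.foldl_nil, hBA]
  -- chain the three conditional updates, tracking the represented function
  set g0 := pvDiffA h n with hg0
  set g1 := pvDiffA h' n with hg1
  -- step 1: j = i - 1
  have s1 : ∃ f1 : Int → Int, pvRepr f1 0 n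
      (if 0 ≤ i - 1 ∧ i - 1 < n then pvUpdate (pvDiffA h' n) (i-1) t else t) ∧
      (∀ x, 0 ≤ x → x < n → f1 x = if x = i - 1 then g1 x else g0 x) := by
    by_cases hc : 0 ≤ i - 1 ∧ i - 1 < n
    · refine ⟨fun x => if x = i - 1 then g1 (i-1) else g0 x, ?_, ?_⟩
      · rw [if_pos hc]; exact pv_repr_update g0 g1 t 0 n (i-1) hr hc.1 hc.2
      · intro x _ _; by_cases hx : x = i - 1 <;> simp [hx]
    · refine ⟨g0, by rw [if_neg hc]; exact hr, ?_⟩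
      intro x hx1 hx2
      rw [if_neg (by omega)]
  obtain ⟨f1, hf1, hf1e⟩ := s1
  -- step 2: j = i (always in range)
  have hrange : (0 ≤ i ∧ i < n) := ⟨hi0, hin⟩
  have s2 : pvRepr (fun x => if x = i then g1 i else f1 x) 0 n
      (if 0 ≤ i ∧ i < n then pvUpdate (pvDiffA h' n) i
        (if 0 ≤ i - 1 ∧ i - 1 < n then pvUpdate (pvDiffA h' n) (i-1) t else t)
       else (if 0 ≤ i - 1 ∧ i - 1 < n then pvUpdate (pvDiffA h' n) (i-1) t else t)) := by
    rw [if_pos hrange]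
    exact pv_repr_update f1 g1 _ 0 n i hf1 hi0 hin
  -- step 3: j = i + 1
  have s3 : ∃ f3 : Int → Int, pvRepr f3 0 n
      (if 0 ≤ i + 1 ∧ i + 1 < n then pvUpdate (pvDiffA h' n) (i+1)
        (if 0 ≤ i ∧ i < n then pvUpdate (pvDiffA h' n) i
          (if 0 ≤ i - 1 ∧ i - 1 < n then pvUpdate (pvDiffA h' n) (i-1) t else t)
         else (if 0 ≤ i - 1 ∧ i - 1 < n then pvUpdate (pvDiffA h' n) (i-1) t else t))
       else (if 0 ≤ i ∧ i < n then pvUpdate (pvDiffA h' n) i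
          (if 0 ≤ i - 1 ∧ i - 1 < n then pvUpdate (pvDiffA h' n) (i-1) t else t)
         else (if 0 ≤ i - 1 ∧ i - 1 < n then pvUpdate (pvDiffA h' n) (i-1) t else t))) ∧
      (∀ x, 0 ≤ x → x < n → f3 x =
        if x = i + 1 then g1 x else if x = i then g1 x else f1 x) := by
    by_cases hc : 0 ≤ i + 1 ∧ i + 1 < n
    · refine ⟨fun x => if x = i + 1 then g1 (i+1) else if x = i then g1 i else f1 x, ?_, ?_⟩
      · rw [if_pos hc]
        exact pv_repr_update _ g1 _ 0 n (i+1) s2 hc.1 hc.2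
      · intro x _ _
        beta_reduce
        by_cases hx : x = i + 1
        · rw [if_pos hx, if_pos hx, hx]
        · rw [if_neg hx, if_neg hx]
          by_cases hx2 : x = i
          · rw [if_pos hx2, if_pos hx2, hx2]
          · rw [if_neg hx2, if_neg hx2]
    · refine ⟨fun x => if x = i then g1 i else f1 x, by rw [if_neg hc]; exact s2, ?_⟩
      intro x hx1 hx2
      rw [if_neg (by omega)]
      show (if x = i then g1 i else f1 x) = if x = i then g1 x else f1 x
      by_cases hx : x = i
      · rw [if_pos hx, if_pos hx, hx]
      · rw [if_neg hx, if_neg hx]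
  obtain ⟨f3, hf3, hf3e⟩ := s3
  refine pv_repr_congr f3 g1 _ 0 n hf3 ?_
  intro x hx1 hx2
  rw [hf3e x hx1 hx2]
  by_cases hx3 : x = i + 1
  · rw [if_pos hx3]
  · rw [if_neg hx3]
    by_cases hx2' : x = i
    · rw [if_pos hx2']
    · rw [if_neg hx2', hf1e x hx1 hx2]
      by_cases hx1' : x = i - 1
      · rw [if_pos hx1']
      · rw [if_neg hx1', hg0, hg1, hh', hn]
        exact (pv_diff_local h i x _ hi0 hin hx1 hx2 ⟨hx1', hx2', hx3⟩).symm

theorem pvLoopA_succ (n : Int) (h : List Int) (k : Nat) :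
    pvLoopA n h (k+1) = if (pvScanA h n).1 ≥ 0 then
      pvLoopA n (PySem.List.pySetD h (pvScanA h n).2 (PySem.List.pyGetD h (pvScanA h n).2 0 - 1)) k
    else h := rfl

theorem pvLoopB_succ (n : Int) (h : List Int) (t : PvTree) (k : Nat) :
    pvLoopB n h t (k+1) = if (pvBest t).1 < 0 then h
    else
      pvLoopB n (PySem.List.pySetD h (pvBest t).2 (PySem.List.pyGetD h (pvBest t).2 0 - 1))
        ([(pvBest t).2 - 1, (pvBest t).2, (pvBest t).2 + 1].foldl
          (fun tt j => if 0 ≤ j ∧ j < n then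
            pvUpdate (pvDiffB (PySem.List.pySetD h (pvBest t).2 (PySem.List.pyGetD h (pvBest t).2 0 - 1)) n) j tt
          else tt) t) k := rfl

-- the two loops stay in lockstep under the tree invariant
theorem pv_loop_eq (k : Nat) : ∀ (h : List Int) (t : PvTree), 0 < (h.length : Int) →
    pvRepr (pvDiffA h (h.length)) 0 (h.length) t →
    pvLoopA (h.length) h k = pvLoopB (h.length) h t k := by
  induction k with
  | zero => intro h t _ _; rfl
  | succ k ih =>
    intro h t hn hr
    rw [pvLoopA_succ, pvLoopB_succ]
    have hbest : pvBest t = pvScanA h (h.length) := by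
      rw [pv_repr_best (pvDiffA h (h.length)) (pv_diffA_gt h _) t 0 (h.length) hr,
          pv_scan_eq_segFold h _ hn]
    rw [hbest]
    by_cases hge : (pvScanA h (h.length)).1 ≥ 0
    · rw [if_pos hge, if_neg (by omega)]
      set i := (pvScanA h (h.length)).2 with hi
      have hidx : 0 ≤ i ∧ i < (h.length : Int) := by
        rw [hi, pv_scan_eq_segFold h _ hn]
        exact pv_segFold_idx h _ hn
      set h' := PySem.List.pySetD h i (PySem.List.pyGetD h i 0 - 1) with hh'
      have hlen : h'.length = h.length := PySem.List.length_pySetD h i _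
      have hr' := pv_tree_step h t i hidx.1 hidx.2 hr
      have := ih h' _ (by rw [hlen]; exact hn) (by rw [hlen]; exact hr')
      rw [hlen] at this
      exact this
    · rw [if_neg hge, if_pos (by omega)]

-- A's loop is the identity when there are no people
theorem pvLoopA_nil (k : Nat) : pvLoopA 0 [] k = [] := by
  cases k with
  | zero => rfl
  | succ k =>
    rw [pvLoopA_succ]
    have : pvScanA [] 0 = ((-2 : Int), (-1 : Int)) := by
      unfold pvScanA
      rw [PySem.List.pyRange_one_eq_nil (by omega)]
      rfl
    rw [this, if_neg (by norm_num)]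

-- A's final range-indexed sum equals B's zip-with-next sum
theorem pv_sum_aux (l : List Int) :
    (List.range (l.length - 1)).map (fun k => |l.getD k 0 - l.getD (k+1) 0|)
      = (l.zip (l.drop 1)).map (fun p => |p.1 - p.2|) := by
  induction l with
  | nil => rfl
  | cons a t ih =>
    cases t with
    | nil => rfl
    | cons b t' =>
      simp only [List.length_cons, Nat.add_sub_cancel] at ih ⊢
      rw [List.range_succ_eq_map]
      simp only [List.map_cons, List.map_map, List.drop_succ_cons, List.drop_zero,
        List.zip_cons_cons, List.getD_cons_zero, List.getD_cons_succ]
      simp only [Function.comp_def, List.getD_cons_succ]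
      simp only [List.drop_succ_cons, List.drop_zero, List.getD_cons_succ] at ih
      rw [ih]

theorem pv_sum_eq (h : List Int) :
    ((PySem.List.pyRange 0 ((h.length : Int) - 1) 1).map
       (fun j => |PySem.List.pyGetD h j 0 - PySem.List.pyGetD h (j+1) 0|)).sum
      = ((h.zip (h.drop 1)).map (fun p => |p.1 - p.2|)).sum := by
  rw [PySem.List.pyRange_one, List.map_map, ← pv_sum_aux]
  congr 1
  have hn : ((h.length : Int) - 1 - 0).toNat = h.length - 1 := by omega
  rw [hn]
  apply List.map_congr_left
  intro k _
  have e1 : ((0 : Int) + (k : Int)) = ((k : Nat) : Int) := by omega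
  have e2 : ((k : Int) + 1) = (((k + 1 : Nat)) : Int) := by omega
  simp only [Function.comp_def, e1, PySem.List.pyGetD_natCast]
  rw [e2, PySem.List.pyGetD_natCast]

-- ===== VERDICT (by name: the statement is the Claim_ definition above) =====
theorem FoodDistribution_spec : Claim_equal_FoodDistribution := by
  intro arr _ _
  unfold Spec_FoodDistribution FoodDistribution FoodDistribution_alt
  cases hg : PySem.List.pyGet? arr 0 with
  | none => rfl
  | some s =>
    simp only
    set h := PySem.List.slice arr (some 1) none with hh
    by_cases hn : 0 < (h.length : Int)
    · rw [if_pos hn,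
          ← pv_loop_eq s.toNat h (pvBuild (pvDiffB h (h.length)) 0 (h.length)) hn
            (pv_repr_build (pvDiffA h (h.length)) (h.length) 0 (h.length) (by omega) hn),
          pv_sum_eq]
    · have h0 : h = [] := List.eq_nil_of_length_eq_zero (by omega)
      rw [if_neg hn, h0]
      simp only [List.length_nil, Nat.cast_zero, pvLoopA_nil]
      rfl
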